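-- pv_equiv track=rewrite | github.com/GM3D/POH2 | traverse1.py | make_wdict
-- ===== SOURCE A (Python) =====
-- sort = list.sort
--
-- def make_wdict(H, W, N, grid, widgets):
--     wdict = {}
--     for widget in widgets:
--         h, w = widget
--         if h not in wdict:
--             wdict[h] = [w]
--         else:
--             if w not in wdict[h]:
--                 wdict[h].append(w)
--     for h in wdict:
--         sort(wdict[h])
--     return wdict
-- ===== SOURCE B (Python) =====
-- def make_wdict(H, W, N, grid, widgets):
--     # first-appearance order of the heights
--     order = list(dict.fromkeys(h for h, _ in widgets))
--     # one sorted pass; adjacency in the sorted order replaces membership tests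
--     groups = {}
--     for h, w in sorted(widgets):
--         g = groups.get(h)
--         if g is None:
--             groups[h] = [w]
--         elif g[-1] != w:
--             g.append(w)
--     return {h: groups[h] for h in order}
-- ===== Notes on version B (the rewrite author's own statement) =====
-- stated objective: alternative
-- what changed: A scans each row's list for membership per widget and then sorts every row; B sorts all widgets once and builds each row in a single grouping pass where duplicates are removed by adjacency, with key order preserved via a first-appearance dedup of the heights.
import Mathlib
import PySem

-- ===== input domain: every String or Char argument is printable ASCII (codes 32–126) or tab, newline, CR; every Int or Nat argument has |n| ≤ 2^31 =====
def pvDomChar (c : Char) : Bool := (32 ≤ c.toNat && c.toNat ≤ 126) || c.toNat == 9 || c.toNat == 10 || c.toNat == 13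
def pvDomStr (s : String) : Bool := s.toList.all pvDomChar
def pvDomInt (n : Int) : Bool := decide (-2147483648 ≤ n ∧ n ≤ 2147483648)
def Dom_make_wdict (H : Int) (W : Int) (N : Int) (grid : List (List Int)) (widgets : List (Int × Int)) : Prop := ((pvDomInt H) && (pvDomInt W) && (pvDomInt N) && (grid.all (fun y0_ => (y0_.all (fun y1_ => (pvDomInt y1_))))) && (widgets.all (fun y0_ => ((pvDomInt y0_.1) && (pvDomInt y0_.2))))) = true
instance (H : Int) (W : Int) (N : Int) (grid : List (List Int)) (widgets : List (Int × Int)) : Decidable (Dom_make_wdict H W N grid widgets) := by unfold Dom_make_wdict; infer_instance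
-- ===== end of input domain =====

-- B replaces A's per-widget membership scans and per-row sorts by one sort of all
-- widgets followed by a single adjacency-deduplicating grouping pass (objective: alternative).

-- ===== PORT A =====
def make_wdict (H : Int) (W : Int) (N : Int) (grid : List (List Int)) (widgets : List (Int × Int)) : List (Int × List Int) :=
  let wdict : PySem.Dict Int (List Int) := widgets.foldl (fun wdict widget =>
    if ¬ wdict.contains widget.1 then wdict.insert widget.1 [widget.2]
    else if ¬ (wdict.getD widget.1 []).contains widget.2 then
      wdict.modify widget.1 [] (fun l => l ++ [widget.2])
    else wdict) PySem.Dict.empty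
  (wdict.keys.foldl (fun d h => d.modify h [] (fun l => PySem.List.sorted l (fun x => x) false)) wdict).items

-- ===== PORT B =====
def make_wdict_alt (H : Int) (W : Int) (N : Int) (grid : List (List Int)) (widgets : List (Int × Int)) : List (Int × List Int) :=
  let order : List Int := PySem.List.dedup (widgets.map (fun p => p.1))
  let groups : PySem.Dict Int (List Int) :=
    (PySem.List.sorted2 widgets (fun p => p.1) (fun p => p.2) false).foldl (fun groups p =>
      match groups.get? p.1 with
      | none => groups.insert p.1 [p.2]
      | some g => if g.getLast? ≠ some p.2 then groups.insert p.1 (g ++ [p.2]) else groups)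
      PySem.Dict.empty
  order.map (fun h => (h, groups.getD h []))

-- ===== PRECONDITION & SPEC =====
def Spec_make_wdict (H : Int) (W : Int) (N : Int) (grid : List (List Int)) (widgets : List (Int × Int)) (out : List (Int × List Int)) : Prop := out = make_wdict_alt H W N grid widgets
instance (H : Int) (W : Int) (N : Int) (grid : List (List Int)) (widgets : List (Int × Int)) (out : List (Int × List Int)) : Decidable (Spec_make_wdict H W N grid widgets out) := by unfold Spec_make_wdict; infer_instance

-- ===== CLAIM (what is proved, stated in full; the proofs are below) =====
def Claim_equal_make_wdict : Prop := ∀ (H : Int) (W : Int) (N : Int) (grid : List (List Int)) (widgets : List (Int × Int)), Dom_make_wdict H W N grid widgets → Spec_make_wdict H W N grid widgets (make_wdict H W N grid widgets)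

-- ===== LEMMAS AND PROOFS =====

-- widths attached to height h, in order of appearance in xs
def pvWs (h : Int) (xs : List (Int × Int)) : List Int :=
  (xs.filter (fun p => p.1 == h)).map (fun p => p.2)

-- a grouping step, as a function of the current (optional) group
def pvStA (o : Option (List Int)) (w : Int) : List Int :=
  match o with | none => [w] | some g => if g.contains w then g else g ++ [w]

def pvStB (o : Option (List Int)) (w : Int) : List Int :=
  match o with | none => [w] | some g => if g.getLast? ≠ some w then g ++ [w] else g

def pvOpt (st : Option (List Int) → Int → List Int) (ws : List Int) : Option (List Int) :=
  ws.foldl (fun o w => some (st o w)) none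

def pvVal (st : Option (List Int) → Int → List Int) (h : Int) (xs : List (Int × Int)) : List Int :=
  (pvOpt st (pvWs h xs)).getD []

lemma pvOpt_append (st : Option (List Int) → Int → List Int) (ws : List Int) (w : Int) :
    pvOpt st (ws ++ [w]) = some (st (pvOpt st ws) w) := by
  simp [pvOpt, List.foldl_append]

lemma pvOpt_eq_none_iff (st : Option (List Int) → Int → List Int) (ws : List Int) :
    pvOpt st ws = none ↔ ws = [] := by
  rcases List.eq_nil_or_concat ws with h | ⟨t, w, rfl⟩
  · subst h; simp [pvOpt]
  · simp [pvOpt_append]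

lemma pvDedup_append (l : List Int) (a : Int) :
    PySem.List.dedup (l ++ [a]) = PySem.Set.add (PySem.List.dedup l) a := by
  simp [PySem.List.dedup, PySem.Set.ofList_eq_foldl, List.foldl_append]

lemma pvWs_append (k : Int) (xs : List (Int × Int)) (p : Int × Int) :
    pvWs k (xs ++ [p]) = pvWs k xs ++ (if p.1 = k then [p.2] else []) := by
  by_cases h : p.1 = k <;> simp [pvWs, List.filter_append, h]

lemma pvMem_fst_iff (a : Int) (xs : List (Int × Int)) :
    a ∈ xs.map (fun p => p.1) ↔ pvWs a xs ≠ [] := by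
  simp only [pvWs, ne_eq, List.map_eq_nil_iff, List.filter_eq_nil_iff, List.mem_map]
  constructor
  · rintro ⟨p, hp, rfl⟩ h; exact h p hp (by simp)
  · intro h; push_neg at h; obtain ⟨p, hp, he⟩ := h
    exact ⟨p, hp, by simpa using he⟩

lemma pvFind (K : List Int) (f : Int → List Int) (a : Int) :
    List.find? (fun p => p.1 == a) (K.map (fun k => (k, f k))) =
      if a ∈ K then some (a, f a) else none := by
  induction K with
  | nil => simp
  | cons k K ih =>
    by_cases h : k = a
    · subst h; simp [List.find?_cons]
    · simp [List.find?_cons, h, Ne.symm h, ih]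

lemma pvGet? (K : List Int) (f : Int → List Int) (a : Int) :
    PySem.Dict.get? (PySem.Dict.mk (K.map (fun k => (k, f k)))) a =
      if a ∈ K then some (f a) else none := by
  simp only [PySem.Dict.get?, PySem.Dict.items, pvFind]
  split_ifs <;> rfl

lemma pvContains (K : List Int) (f : Int → List Int) (a : Int) :
    PySem.Dict.contains (PySem.Dict.mk (K.map (fun k => (k, f k)))) a = decide (a ∈ K) := by
  induction K with
  | nil => simp [PySem.Dict.contains]
  | cons k K ih =>
    by_cases h : k = a
    · subst h; simp [PySem.Dict.contains]
    · simp only [PySem.Dict.contains, PySem.Dict.items] at ih ⊢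
      simp [h, Ne.symm h, ih]

lemma pvReplace (K : List Int) (f : Int → List Int) (a : Int) (v : List Int) :
    (K.map (fun k => (k, f k))).map (fun p => if p.1 == a then (a, v) else p) =
      K.map (fun k => (k, if k = a then v else f k)) := by
  rw [List.map_map]
  apply List.map_congr_left
  intro k _
  by_cases h : k = a
  · subst h; simp
  · simp [h]

-- generic characterisation of a "group into a dict" fold
lemma pvGFold (st : Option (List Int) → Int → List Int)
    (Fb : PySem.Dict Int (List Int) → Int × Int → PySem.Dict Int (List Int))
    (hFb : ∀ (K : List Int) (f : Int → List Int) (p : Int × Int), K.Nodup →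
      Fb (PySem.Dict.mk (K.map (fun k => (k, f k)))) p =
        PySem.Dict.mk ((PySem.Set.add K p.1).map (fun k =>
          (k, if k = p.1 then st (if p.1 ∈ K then some (f p.1) else none) p.2 else f k))))
    (xs : List (Int × Int)) :
    xs.foldl Fb PySem.Dict.empty =
      PySem.Dict.mk ((PySem.List.dedup (xs.map (fun p => p.1))).map (fun k => (k, pvVal st k xs))) := by
  induction xs using List.reverseRecOn with
  | nil => simp [PySem.Dict.empty, PySem.List.dedup, PySem.Set.ofList_eq_foldl]
  | append_singleton xs p ih =>
    have hnd : (PySem.List.dedup (xs.map (fun p => p.1))).Nodup := by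
      simpa [PySem.List.dedup] using PySem.Set.nodup_ofList (xs.map (fun p => p.1))
    rw [List.foldl_append, List.foldl_cons, List.foldl_nil, ih, hFb _ _ _ hnd]
    have hM : (xs ++ [p]).map (fun p => p.1) = xs.map (fun p => p.1) ++ [p.1] := by simp
    rw [hM, pvDedup_append]
    congr 1
    apply List.map_congr_left
    intro k _
    by_cases hk : k = p.1
    · have hval : pvVal st k (xs ++ [p]) = st (pvOpt st (pvWs k xs)) p.2 := by
        rw [pvVal, pvWs_append, if_pos hk.symm, pvOpt_append]; rfl
      have harg : (if p.1 ∈ PySem.List.dedup (xs.map (fun p => p.1)) then some (pvVal st p.1 xs) else none)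
          = pvOpt st (pvWs k xs) := by
        rw [← hk]
        have hmem : k ∈ PySem.List.dedup (xs.map (fun p => p.1)) ↔ k ∈ xs.map (fun p => p.1) := by
          simpa [PySem.List.dedup] using PySem.Set.mem_ofList (xs.map (fun p => p.1)) k
        by_cases hin : k ∈ xs.map (fun p => p.1)
        · rw [if_pos (hmem.mpr hin)]
          have : pvOpt st (pvWs k xs) ≠ none := by
            rw [Ne, pvOpt_eq_none_iff]; exact (pvMem_fst_iff k xs).mp hin
          obtain ⟨v, hv⟩ := Option.ne_none_iff_exists'.mp this
          rw [hv, pvVal, hv]; rfl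
        · rw [if_neg (fun hc => hin (hmem.mp hc)), Eq.comm, pvOpt_eq_none_iff]
          by_contra hne
          exact hin ((pvMem_fst_iff k xs).mpr hne)
      rw [if_pos hk, harg, hval]
    · rw [if_neg hk]
      have : pvWs k (xs ++ [p]) = pvWs k xs := by
        rw [pvWs_append, if_neg (fun hc => hk hc.symm)]; simp
      simp [pvVal, this]

-- A's loop body has the generic shape with step pvStA
lemma pvBodyA (K : List Int) (f : Int → List Int) (p : Int × Int) (hK : K.Nodup) :
    (fun (wdict : PySem.Dict Int (List Int)) (widget : Int × Int) =>
      if ¬ wdict.contains widget.1 then wdict.insert widget.1 [widget.2]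
      else if ¬ (wdict.getD widget.1 []).contains widget.2 then
        wdict.modify widget.1 [] (fun l => l ++ [widget.2])
      else wdict) (PySem.Dict.mk (K.map (fun k => (k, f k)))) p =
      PySem.Dict.mk ((PySem.Set.add K p.1).map (fun k =>
        (k, if k = p.1 then pvStA (if p.1 ∈ K then some (f p.1) else none) p.2 else f k))) := by
  obtain ⟨a, b⟩ := p
  simp only [pvContains]
  by_cases ha : a ∈ K
  · have hgd : PySem.Dict.getD (PySem.Dict.mk (K.map (fun k => (k, f k)))) a [] = f a := by
      simp [PySem.Dict.getD, pvGet?, ha]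
    have hadd : PySem.Set.add K a = K := by
      simp [PySem.Set.add, PySem.Set.contains, List.elem_eq_contains, ha]
    rw [if_neg (by simp [ha]), hgd, hadd]
    by_cases hb : b ∈ f a
    · rw [if_neg (by simp [hb])]
      congr 1
      apply (List.map_congr_left _).symm
      intro k _
      by_cases hk : k = a
      · simp [hk, pvStA, ha, hb]
      · simp [hk]
    · rw [if_pos (by simp [hb])]
      simp only [PySem.Dict.modify, hgd, PySem.Dict.insert, pvContains]
      rw [if_pos (by simp [ha])]
      rw [pvReplace]
      congr 1
      apply List.map_congr_left
      intro k _
      by_cases hk : k = a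
      · simp [hk, pvStA, ha, hb]
      · simp [hk]
  · have hadd : PySem.Set.add K a = K ++ [a] := by
      simp [PySem.Set.add, PySem.Set.contains, List.elem_eq_contains, ha]
    rw [if_pos (by simp [ha])]
    simp only [PySem.Dict.insert, pvContains]
    rw [if_neg (by simp [ha])]
    rw [hadd, List.map_append]
    refine congrArg PySem.Dict.mk ?_
    refine (congrArg₂ (· ++ ·) ?_ ?_).symm
    · refine List.map_congr_left ?_
      intro k hkK
      have hk : ¬ k = a := fun hc => ha (hc ▸ hkK)
      simp [hk]
    · simp [pvStA, ha]

-- B's loop body has the generic shape with step pvStB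
lemma pvBodyB (K : List Int) (f : Int → List Int) (p : Int × Int) (hK : K.Nodup) :
    (fun (groups : PySem.Dict Int (List Int)) (p : Int × Int) =>
      match groups.get? p.1 with
      | none => groups.insert p.1 [p.2]
      | some g => if g.getLast? ≠ some p.2 then groups.insert p.1 (g ++ [p.2]) else groups)
      (PySem.Dict.mk (K.map (fun k => (k, f k)))) p =
      PySem.Dict.mk ((PySem.Set.add K p.1).map (fun k =>
        (k, if k = p.1 then pvStB (if p.1 ∈ K then some (f p.1) else none) p.2 else f k))) := by
  obtain ⟨a, b⟩ := p
  simp only [pvGet?]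
  by_cases ha : a ∈ K
  · have hadd : PySem.Set.add K a = K := by
      simp [PySem.Set.add, PySem.Set.contains, List.elem_eq_contains, ha]
    rw [if_pos ha, hadd]
    by_cases hb : (f a).getLast? = some b
    · simp only [hb, ne_eq, not_true_eq_false, if_false]
      congr 1
      apply (List.map_congr_left _).symm
      intro k _
      by_cases hk : k = a
      · simp [hk, pvStB, ha, hb]
      · simp [hk]
    · simp only [hb, ne_eq, not_false_eq_true, if_true]
      simp only [PySem.Dict.insert, pvContains]
      rw [if_pos (by simp [ha])]
      rw [pvReplace]
      congr 1
      apply List.map_congr_left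
      intro k _
      by_cases hk : k = a
      · simp [hk, pvStB, ha, hb]
      · simp [hk]
  · have hadd : PySem.Set.add K a = K ++ [a] := by
      simp [PySem.Set.add, PySem.Set.contains, List.elem_eq_contains, ha]
    rw [if_neg ha]
    simp only [PySem.Dict.insert, pvContains]
    rw [if_neg (by simp [ha])]
    rw [hadd, List.map_append]
    refine congrArg PySem.Dict.mk ?_
    refine (congrArg₂ (· ++ ·) ?_ ?_).symm
    · refine List.map_congr_left ?_
      intro k hkK
      have hk : ¬ k = a := fun hc => ha (hc ▸ hkK)
      simp [hk]
    · simp [pvStB, ha]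

-- A's second loop: sort every stored row
lemma pvSortLoop (L : List Int) :
    ∀ (K : List Int) (f : Int → List Int), L.Nodup → (∀ k ∈ L, k ∈ K) →
    L.foldl (fun d h => d.modify h [] (fun l => PySem.List.sorted l (fun x => x) false))
        (PySem.Dict.mk (K.map (fun k => (k, f k)))) =
      PySem.Dict.mk (K.map (fun k =>
        (k, if k ∈ L then PySem.List.sorted (f k) (fun x => x) false else f k))) := by
  induction L with
  | nil => intro K f _ _; simp
  | cons h L ih =>
    intro K f hnd hsub
    have hhK : h ∈ K := hsub h (by simp)
    have hstep : PySem.Dict.modify (PySem.Dict.mk (K.map (fun k => (k, f k)))) h []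
        (fun l => PySem.List.sorted l (fun x => x) false) =
        PySem.Dict.mk (K.map (fun k =>
          (k, if k = h then PySem.List.sorted (f k) (fun x => x) false else f k))) := by
      have hgd : PySem.Dict.getD (PySem.Dict.mk (K.map (fun k => (k, f k)))) h [] = f h := by
        simp [PySem.Dict.getD, pvGet?, hhK]
      simp only [PySem.Dict.modify, hgd, PySem.Dict.insert, pvContains, hhK, decide_true,
        if_true, PySem.Dict.items]
      rw [pvReplace]
      congr 1
      apply List.map_congr_left
      intro k _
      by_cases hk : k = h
      · subst hk; simp
      · simp [hk]
    rw [List.foldl_cons, hstep,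
      ih K _ hnd.of_cons (fun k hk => hsub k (List.mem_cons_of_mem _ hk))]
    congr 1
    apply List.map_congr_left
    intro k _
    by_cases hk : k = h
    · subst hk
      have : k ∉ L := (List.nodup_cons.mp hnd).1
      simp [this]
    · by_cases hkL : k ∈ L <;> simp [hk, hkL]

lemma pvA_items (H W N : Int) (grid : List (List Int)) (widgets : List (Int × Int)) :
    make_wdict H W N grid widgets =
      (PySem.List.dedup (widgets.map (fun p => p.1))).map (fun k =>
        (k, PySem.List.sorted (pvVal pvStA k widgets) (fun x => x) false)) := by
  have hfold := pvGFold pvStA (fun wdict widget =>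
    if ¬ wdict.contains widget.1 then wdict.insert widget.1 [widget.2]
    else if ¬ (wdict.getD widget.1 []).contains widget.2 then
      wdict.modify widget.1 [] (fun l => l ++ [widget.2])
    else wdict) pvBodyA widgets
  have hnd : (PySem.List.dedup (widgets.map (fun p => p.1))).Nodup := by
    simpa [PySem.List.dedup] using PySem.Set.nodup_ofList (widgets.map (fun p => p.1))
  unfold make_wdict
  dsimp only
  rw [hfold]
  have hkeys : PySem.Dict.keys (PySem.Dict.mk
      ((PySem.List.dedup (widgets.map (fun p => p.1))).map (fun k => (k, pvVal pvStA k widgets))))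
      = PySem.List.dedup (widgets.map (fun p => p.1)) := by
    simp [PySem.Dict.keys, List.map_map, Function.comp_def]
  rw [hkeys, pvSortLoop _ _ _ hnd (fun k hk => hk)]
  apply List.map_congr_left
  intro k hk
  rw [if_pos hk]

lemma pvB_items (H W N : Int) (grid : List (List Int)) (widgets : List (Int × Int)) :
    make_wdict_alt H W N grid widgets =
      (PySem.List.dedup (widgets.map (fun p => p.1))).map (fun h =>
        (h, pvVal pvStB h (PySem.List.sorted2 widgets (fun p => p.1) (fun p => p.2) false))) := by
  have hfold := pvGFold pvStB (fun groups p =>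
      match groups.get? p.1 with
      | none => groups.insert p.1 [p.2]
      | some g => if g.getLast? ≠ some p.2 then groups.insert p.1 (g ++ [p.2]) else groups)
    pvBodyB (PySem.List.sorted2 widgets (fun p => p.1) (fun p => p.2) false)
  unfold make_wdict_alt
  dsimp only
  rw [hfold]
  apply List.map_congr_left
  intro h hh
  have hhM : h ∈ widgets.map (fun p => p.1) := by
    have := PySem.Set.mem_ofList (widgets.map (fun p => p.1)) h
    simpa [PySem.List.dedup] using this.mp (by simpa [PySem.List.dedup] using hh)
  have hperm : ((PySem.List.sorted2 widgets (fun p => p.1) (fun p => p.2) false).map (fun p => p.1)).Perm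
      (widgets.map (fun p => p.1)) :=
    (PySem.List.sorted2_perm widgets _ _ false).map _
  have hhSw : h ∈ (PySem.List.sorted2 widgets (fun p => p.1) (fun p => p.2) false).map (fun p => p.1) :=
    hperm.mem_iff.mpr hhM
  simp [PySem.Dict.getD, pvGet?, (PySem.Set.mem_ofList ((PySem.List.sorted2 widgets (fun p => p.1) (fun p => p.2) false).map (fun p => p.1)) h).mpr hhSw]

-- pvStA accumulates exactly set-insertion
lemma pvOptA_from (t : List Int) : ∀ g : List Int,
    t.foldl (fun o w => some (pvStA o w)) (some g) = some (t.foldl PySem.Set.add g) := by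
  induction t with
  | nil => intro g; rfl
  | cons w t ih => intro g; rw [List.foldl_cons, List.foldl_cons, ← ih]; rfl

lemma pvOptA_eq (ws : List Int) (hne : ws ≠ []) :
    pvOpt pvStA ws = some (PySem.Set.ofList ws) := by
  cases ws with
  | nil => exact absurd rfl hne
  | cons w t =>
    rw [pvOpt, List.foldl_cons]
    have h1 : (some (pvStA none w)) = some [w] := rfl
    rw [h1, pvOptA_from, PySem.Set.ofList_eq_foldl, List.foldl_cons]
    rfl

-- insertion sort produces a pairwise-ordered list
lemma pvInsertBy_pairwise {α : Type} (before : α → α → Bool)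
    (ht : ∀ a b c, before a b = true → before b c = true → before a c = true)
    (hirr : ∀ a, before a a = false)
    (x : α) (ys : List α) (hys : ys.Pairwise (fun a b => before b a = false)) :
    (PySem.List.insertBy before x ys).Pairwise (fun a b => before b a = false) := by
  induction ys with
  | nil => simp [PySem.List.insertBy]
  | cons y ys ih =>
    have hunf : PySem.List.insertBy before x (y :: ys) =
        if before x y = true then x :: y :: ys else y :: PySem.List.insertBy before x ys := rfl
    rw [hunf]
    by_cases hxy : before x y = true
    · rw [if_pos hxy]
      refine List.Pairwise.cons ?_ hys
      intro z hz
      rcases List.mem_cons.mp hz with hzy | hz'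
      · subst hzy
        by_contra hzx
        have hzx' : before z x = true := by revert hzx; cases before z x <;> simp
        have := ht x z x hxy hzx'
        simp [hirr x] at this
      · have hzy : before z y = false := (List.pairwise_cons.mp hys).1 z hz'
        by_contra hzx
        have hzx' : before z x = true := by revert hzx; cases before z x <;> simp
        have := ht z x y hzx' hxy
        rw [hzy] at this; exact absurd this (by simp)
    · rw [if_neg hxy]
      refine List.Pairwise.cons ?_ (ih (List.pairwise_cons.mp hys).2)
      intro w hw
      rcases (PySem.List.mem_insertBy before x w ys).mp hw with rfl | hw'
      · simpa using hxy
      · exact (List.pairwise_cons.mp hys).1 w hw'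

lemma pvSortFold_pairwise {α : Type} (before : α → α → Bool)
    (ht : ∀ a b c, before a b = true → before b c = true → before a c = true)
    (hirr : ∀ a, before a a = false) (xs : List α) :
    ∀ acc : List α, acc.Pairwise (fun a b => before b a = false) →
    (xs.foldl (fun acc x => PySem.List.insertBy before x acc) acc).Pairwise
      (fun a b => before b a = false) := by
  induction xs with
  | nil => intro acc h; simpa using h
  | cons x xs ih =>
    intro acc h
    rw [List.foldl_cons]
    exact ih _ (pvInsertBy_pairwise before ht hirr x acc h)

-- the widths of row h in the sorted widget list are ≤-ordered
lemma pvS_pairwise (widgets : List (Int × Int)) (h : Int) :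
    (pvWs h (PySem.List.sorted2 widgets (fun p => p.1) (fun p => p.2) false)).Pairwise (· ≤ ·) := by
  set before : Int × Int → Int × Int → Bool :=
    fun a b => decide (a.1 < b.1) || (!decide (b.1 < a.1) && decide (a.2 < b.2)) with hbef
  have ht : ∀ a b c, before a b = true → before b c = true → before a c = true := by
    intro a b c hab hbc
    simp only [hbef, Bool.or_eq_true, Bool.and_eq_true, Bool.not_eq_true', decide_eq_true_eq,
      decide_eq_false_iff_not] at hab hbc ⊢
    omega
  have hirr : ∀ a, before a a = false := by
    intro a
    simp only [hbef, Bool.or_eq_false_iff, Bool.and_eq_false_iff, Bool.not_eq_true,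
      decide_eq_false_iff_not]
    omega
  have hsw : (PySem.List.sorted2 widgets (fun p => p.1) (fun p => p.2) false).Pairwise
      (fun a b => before b a = false) := by
    rw [PySem.List.sorted2]
    exact pvSortFold_pairwise before ht hirr widgets [] (by simp)
  have hfil := hsw.sublist (List.filter_sublist (p := fun p => p.1 == h))
  rw [pvWs, List.pairwise_map]
  refine List.Pairwise.imp_of_mem ?_ hfil
  intro a b ha hb hab
  have ha1 : a.1 = h := by simpa using (List.mem_filter.mp ha).2
  have hb1 : b.1 = h := by simpa using (List.mem_filter.mp hb).2
  simp only [hbef, Bool.or_eq_false_iff, Bool.and_eq_false_iff, Bool.not_eq_false',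
    decide_eq_false_iff_not, decide_eq_true_eq] at hab
  omega

lemma pvLeLast (R : List Int) (hp : R.Pairwise (· ≤ ·)) (l : Int) (hl : R.getLast? = some l) :
    ∀ x ∈ R, x ≤ l := by
  rcases List.eq_nil_or_concat R with rfl | ⟨t, w, rfl⟩
  · simp at hl
  · simp only [List.concat_eq_append] at hp hl ⊢
    rw [List.getLast?_concat] at hl
    have hwl : w = l := by simpa using hl
    intro x hx
    rcases List.mem_append.mp hx with hx' | hx'
    · have h2 := (List.pairwise_append.mp hp).2.2 x hx' w (by simp)
      omega
    · simp at hx'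
      omega

-- the adjacency-dedup fold on a ≤-ordered list: strictly ordered, same members, same last
lemma pvAdj (S : List Int) (hS : S.Pairwise (· ≤ ·)) (hne : S ≠ []) :
    ∃ R, pvOpt pvStB S = some R ∧ R.Pairwise (· < ·) ∧ (∀ x, x ∈ R ↔ x ∈ S) ∧
      R.getLast? = S.getLast? := by
  induction S using List.reverseRecOn with
  | nil => exact absurd rfl hne
  | append_singleton S w ih =>
    rcases List.eq_nil_or_concat S with rfl | ⟨t, v, hS'⟩
    · exact ⟨[w], by simp [pvOpt, pvStB], by simp, by simp, by simp⟩
    · rw [List.concat_eq_append] at hS'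
      have hSne : S ≠ [] := by rw [hS']; simp
      have hSp : S.Pairwise (· ≤ ·) := (List.pairwise_append.mp hS).1
      obtain ⟨R, hR, hRp, hRm, hRl⟩ := ih hSp hSne
      have hle : ∀ x ∈ S, x ≤ w := fun x hx => (List.pairwise_append.mp hS).2.2 x hx w (by simp)
      rw [pvOpt_append, hR]
      obtain ⟨l, hl⟩ : ∃ l, S.getLast? = some l := by
        rw [hS', List.getLast?_concat]; exact ⟨v, rfl⟩
      have hlR : R.getLast? = some l := hRl.trans hl
      by_cases hw : R.getLast? = some w
      · refine ⟨R, by simp [pvStB, hw], hRp, ?_, ?_⟩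
        · intro x
          rw [hRm]
          have hwS : w ∈ S := List.mem_of_getLast? (hRl ▸ hw)
          constructor
          · intro hx; exact List.mem_append.mpr (Or.inl hx)
          · intro hx; rcases List.mem_append.mp hx with hx' | hx'
            · exact hx'
            · simp at hx'; exact hx' ▸ hwS
        · rw [List.getLast?_concat, hw]
      · refine ⟨R ++ [w], by simp [pvStB, hw], ?_, ?_, by rw [List.getLast?_concat, List.getLast?_concat]⟩
        · have hlw : l < w := by
            have hlS : l ∈ S := List.mem_of_getLast? hl
            have h1 : l ≤ w := hle l hlS
            have h2 : l ≠ w := fun hc => hw (hlR.trans (by rw [hc]))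
            omega
          rw [List.pairwise_append]
          refine ⟨hRp, by simp, ?_⟩
          intro a ha b hb
          simp at hb
          subst hb
          have := pvLeLast R (hRp.imp (fun h => le_of_lt h)) l hlR a ha
          omega
        · intro x
          simp only [List.mem_append, hRm, List.mem_singleton]
  -- per-row agreement: sorting A's dedup list equals B's adjacency dedup of the sorted row

lemma pvKey (widgets : List (Int × Int)) (h : Int) (hmem : h ∈ widgets.map (fun p => p.1)) :
    PySem.List.sorted (pvVal pvStA h widgets) (fun x => x) false =
      pvVal pvStB h (PySem.List.sorted2 widgets (fun p => p.1) (fun p => p.2) false) := by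
  set sw := PySem.List.sorted2 widgets (fun p => p.1) (fun p => p.2) false with hsw
  have hws : pvWs h widgets ≠ [] := (pvMem_fst_iff h widgets).mp hmem
  -- A's row value is the ordered dedup of the appearance-order widths, then sorted
  have hA : pvVal pvStA h widgets = PySem.Set.ofList (pvWs h widgets) := by
    rw [pvVal, pvOptA_eq _ hws]; rfl
  -- B's row list S is a ≤-ordered permutation of the same widths
  have hSperm : (pvWs h sw).Perm (pvWs h widgets) := by
    have := (PySem.List.sorted2_perm widgets (fun p => p.1) (fun p => p.2) false).filter
      (fun p => p.1 == h)
    exact this.map _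
  have hSp : (pvWs h sw).Pairwise (· ≤ ·) := pvS_pairwise widgets h
  have hSne : pvWs h sw ≠ [] := by
    intro hc
    exact hws ((hc ▸ hSperm).symm.eq_nil)
  obtain ⟨R, hR, hRp, hRm, _⟩ := pvAdj _ hSp hSne
  have hB : pvVal pvStB h sw = R := by rw [pvVal, hR]; rfl
  rw [hA, hB]
  -- both sides are strictly ordered lists with the same members
  set T := PySem.List.sorted (PySem.Set.ofList (pvWs h widgets)) (fun x => x) false with hT
  have hTperm : T.Perm (PySem.Set.ofList (pvWs h widgets)) :=
    PySem.List.sorted_perm _ _ _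
  have hTnd : T.Nodup := hTperm.nodup_iff.mpr (PySem.Set.nodup_ofList _)
  have hTle : T.Pairwise (· ≤ ·) := by
    have := PySem.List.sorted_pairwise (PySem.Set.ofList (pvWs h widgets)) (fun x => x)
    simpa using this
  have hTlt : T.Pairwise (· < ·) :=
    (hTle.and hTnd).imp (fun hx => lt_of_le_of_ne hx.1 hx.2)
  have hmemTR : ∀ x, x ∈ T ↔ x ∈ R := by
    intro x
    rw [hRm, hTperm.mem_iff, PySem.Set.mem_ofList, ← hSperm.mem_iff]
  have hRnd : R.Nodup := hRp.imp ne_of_lt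
  have hperm : T.Perm R := (List.perm_ext_iff_of_nodup hTnd hRnd).mpr hmemTR
  exact hperm.eq_of_pairwise (fun a b _ _ h1 h2 => absurd h2 (not_lt.2 h1.le)) hTlt hRp

-- ===== VERDICT (by name: the statement is the Claim_ definition above) =====
theorem make_wdict_spec : Claim_equal_make_wdict := by
  intro H W N grid widgets _
  unfold Spec_make_wdict
  rw [pvA_items, pvB_items]
  apply List.map_congr_left
  intro k hk
  have hkM : k ∈ widgets.map (fun p => p.1) := by
    have := PySem.Set.mem_ofList (widgets.map (fun p => p.1)) k
    exact this.mp (by simpa [PySem.List.dedup] using hk)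
  rw [pvKey widgets k hkM]
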